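-- pv_equiv track=rewrite | github.com/edmundoCA/hyperskill | dominoes.py | determinate_starting_piece
-- ===== SOURCE A (Python) =====
-- def determinate_starting_piece(player_pieces, computer_pieces):
--   piece = None
--   i = 7
--   while piece is None and i > 0:
--     if [i, i] in player_pieces:
--       player_pieces.remove([i, i])
--       piece = [i, i]
--     elif [i, i] in computer_pieces:
--       computer_pieces.remove([i, i])
--       piece = [i, i]
--     i -= 1
--   return piece
-- ===== SOURCE B (Python) =====
-- def determinate_starting_piece(player_pieces, computer_pieces):
--     # Gather present double-values, pick the max, remove it once (player hand first).
--     candidates = [i for i in range(1, 8)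
--                   if [i, i] in player_pieces or [i, i] in computer_pieces]
--     if not candidates:
--         return None
--     i = max(candidates)
--     if [i, i] in player_pieces:
--         player_pieces.remove([i, i])
--     else:
--         computer_pieces.remove([i, i])
--     return [i, i]
-- ===== Notes on version B (the rewrite author's own statement) =====
-- stated objective: alternative
-- what changed: Replaces A's fused descending find-and-remove while-loop with a gather-candidates / max / single-remove decomposition: build the list of double-values present in either hand, take its maximum, then remove that double from the first hand holding it.
import Mathlib
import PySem

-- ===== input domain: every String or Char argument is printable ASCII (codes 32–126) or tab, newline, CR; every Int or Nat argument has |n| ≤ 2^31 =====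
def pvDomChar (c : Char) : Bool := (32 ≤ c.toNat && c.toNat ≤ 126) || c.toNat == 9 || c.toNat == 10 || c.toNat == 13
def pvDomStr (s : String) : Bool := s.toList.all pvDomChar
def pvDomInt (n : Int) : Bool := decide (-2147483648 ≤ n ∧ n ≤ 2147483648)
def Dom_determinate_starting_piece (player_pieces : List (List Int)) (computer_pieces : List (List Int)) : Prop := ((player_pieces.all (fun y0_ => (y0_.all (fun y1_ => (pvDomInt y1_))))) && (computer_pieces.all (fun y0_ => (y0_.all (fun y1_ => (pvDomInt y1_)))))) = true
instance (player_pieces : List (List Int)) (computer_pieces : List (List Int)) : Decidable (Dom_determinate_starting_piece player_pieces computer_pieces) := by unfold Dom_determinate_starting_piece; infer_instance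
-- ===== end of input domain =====

-- B replaces A's fused descending find-and-remove loop with a gather-candidates / max / single-remove
-- decomposition (same cost); equivalence proved for the RETURN value — both Pythons also perform the
-- same single removal from the same hand (checked by test, not by the theorem).


-- ===== PORT A =====
-- A's while loop: i counts down 7,6,…,1; stops when a double is found or i hits 0.
def pvALoop (player_pieces computer_pieces : List (List Int)) : Nat → Option (List Int)
  | 0 => none
  | n+1 =>
    let i : Int := (n+1 : Nat)
    if [i, i] ∈ player_pieces then some [i, i]
    else if [i, i] ∈ computer_pieces then some [i, i]
    else pvALoop player_pieces computer_pieces n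

def determinate_starting_piece (player_pieces : List (List Int)) (computer_pieces : List (List Int)) : Option (List Int) :=
  pvALoop player_pieces computer_pieces 7

-- ===== PORT B =====
def determinate_starting_piece_alt (player_pieces : List (List Int)) (computer_pieces : List (List Int)) : Option (List Int) :=
  let candidates := (PySem.List.pyRange 1 8 1).filter
    (fun i => decide ([i, i] ∈ player_pieces ∨ [i, i] ∈ computer_pieces))
  match PySem.List.max? candidates (fun x => x) with
  | none => none
  | some i => some [i, i]

-- ===== PRECONDITION & SPEC =====
def Spec_determinate_starting_piece (player_pieces : List (List Int)) (computer_pieces : List (List Int)) (out : Option (List Int)) : Prop := out = determinate_starting_piece_alt player_pieces computer_pieces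
instance (player_pieces : List (List Int)) (computer_pieces : List (List Int)) (out : Option (List Int)) : Decidable (Spec_determinate_starting_piece player_pieces computer_pieces out) := by unfold Spec_determinate_starting_piece; infer_instance

-- ===== CLAIM (what is proved, stated in full; the proofs are below) =====
def Claim_equal_determinate_starting_piece : Prop := ∀ (player_pieces : List (List Int)) (computer_pieces : List (List Int)), Dom_determinate_starting_piece player_pieces computer_pieces → Spec_determinate_starting_piece player_pieces computer_pieces (determinate_starting_piece player_pieces computer_pieces)

-- ===== LEMMAS AND PROOFS =====

-- A's two successive hand checks collapse to a single disjunction (the result is the same piece).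
theorem pvALoop_step (p c : List (List Int)) (n : Nat) :
    pvALoop p c (n+1) =
      (if [(↑(n+1) : Int), ↑(n+1)] ∈ p ∨ [(↑(n+1) : Int), ↑(n+1)] ∈ c
       then some [(↑(n+1) : Int), ↑(n+1)] else pvALoop p c n) := by
  simp only [pvALoop]
  split_ifs with h1 h2 h3 h4 <;> tauto

theorem determinate_starting_piece_spec' (p c : List (List Int)) :
    determinate_starting_piece p c = determinate_starting_piece_alt p c := by
  unfold determinate_starting_piece determinate_starting_piece_alt
  have e : PySem.List.pyRange 1 8 1 = [1, 2, 3, 4, 5, 6, 7] := by decide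
  rw [e]
  by_cases h7 : [(7:Int),7] ∈ p ∨ [(7:Int),7] ∈ c <;>
  by_cases h6 : [(6:Int),6] ∈ p ∨ [(6:Int),6] ∈ c <;>
  by_cases h5 : [(5:Int),5] ∈ p ∨ [(5:Int),5] ∈ c <;>
  by_cases h4 : [(4:Int),4] ∈ p ∨ [(4:Int),4] ∈ c <;>
  by_cases h3 : [(3:Int),3] ∈ p ∨ [(3:Int),3] ∈ c <;>
  by_cases h2 : [(2:Int),2] ∈ p ∨ [(2:Int),2] ∈ c <;>
  by_cases h1 : [(1:Int),1] ∈ p ∨ [(1:Int),1] ∈ c <;>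
  · rw [show (7:Nat) = 6+1 from rfl, pvALoop_step,
      show (6:Nat) = 5+1 from rfl, pvALoop_step,
      show (5:Nat) = 4+1 from rfl, pvALoop_step,
      show (4:Nat) = 3+1 from rfl, pvALoop_step,
      show (3:Nat) = 2+1 from rfl, pvALoop_step,
      show (2:Nat) = 1+1 from rfl, pvALoop_step,
      show (1:Nat) = 0+1 from rfl, pvALoop_step]
    simp_all [pvALoop, PySem.List.max?, List.filter]

-- ===== VERDICT (by name: the statement is the Claim_ definition above) =====
theorem determinate_starting_piece_spec : Claim_equal_determinate_starting_piece := by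
  intro p c _
  unfold Spec_determinate_starting_piece
  exact determinate_starting_piece_spec' p c
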